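-- pv_equiv track=rewrite | github.com/GarfieldJiang/CLRS | Greedy/greedy_elements.py | plan_water_stops
-- ===== SOURCE A (Python) =====
-- def plan_water_stops(positions, duration):
--     """
--     Ex 16.2-4. Greedy algorithm with O(n) run time, where n is len(positions)
--     :param positions: positions of the water stops plus the beginning and ending points of the trip.
--     :param duration: how much distance the professor can cover without refilling his water supply.
--     :return: The optimal choice of water stop indices, including the beginning point.
--     """
--
--     if not positions:
--         return 0, ()
--
--     n = len(positions)
--     for i in range(1, n):
--         assert positions[i - 1] < positions[i]
--     assert duration > 0
--
--     stops = [0]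
--     for i in range(1, n):
--         last_stop_pos = positions[stops[-1]]
--         if positions[i] - last_stop_pos > duration:  # No way to finish the trip.
--             return -1, ()
--
--         if i == n - 1:
--             break
--
--         if positions[i + 1] - last_stop_pos > duration:
--             stops.append(i)
--
--     return len(stops), tuple(stops)
-- ===== SOURCE B (Python) =====
-- def plan_water_stops(positions, duration):
--     if not positions:
--         return 0, ()
--
--     n = len(positions)
--     for i in range(1, n):
--         assert positions[i - 1] < positions[i]
--     assert duration > 0
--
--     stops = [0]
--     s = 0
--     while positions[n - 1] - positions[s] > duration:
--         j = s
--         while j + 1 < n and positions[j + 1] - positions[s] <= duration: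
--             j += 1
--         if j == s:  # next stop unreachable
--             return -1, ()
--         stops.append(j)
--         s = j
--     return len(stops), tuple(stops)
-- ===== Notes on version B (the rewrite author's own statement) =====
-- stated objective: alternative
-- what changed: A's single flat pass over all positions with one-step lookahead is re-decomposed into an outer while-loop over chosen stops with an inner greedy scan that jumps to the farthest reachable position.
import Mathlib
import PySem

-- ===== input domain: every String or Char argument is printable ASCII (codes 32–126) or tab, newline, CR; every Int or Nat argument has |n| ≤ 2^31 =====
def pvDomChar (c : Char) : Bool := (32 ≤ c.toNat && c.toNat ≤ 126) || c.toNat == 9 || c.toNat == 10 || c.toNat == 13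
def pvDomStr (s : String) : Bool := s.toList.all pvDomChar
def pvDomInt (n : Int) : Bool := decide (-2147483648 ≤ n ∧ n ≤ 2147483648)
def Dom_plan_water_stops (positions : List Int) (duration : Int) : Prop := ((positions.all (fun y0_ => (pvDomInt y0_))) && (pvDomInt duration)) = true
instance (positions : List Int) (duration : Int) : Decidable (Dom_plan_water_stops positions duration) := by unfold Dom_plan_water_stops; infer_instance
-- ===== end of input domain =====

-- B re-decomposes A's single flat pass with lookahead into an outer loop over chosen
-- stops with an inner greedy scan (objective: alternative decomposition, same O(n) cost).

-- `xs[i]` where the algorithm guarantees the index is in range (the .getD 0 fallback is never hit)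
def pyAt (xs : List Int) (i : Int) : Int := (PySem.List.pyGet? xs i).getD 0

-- ===== PORT A =====
-- Python A's single for-loop over i in range(1, n), with its three early exits.
def planA_loop (ps : List Int) (d : Int) (n : Nat) (i : Nat) (stops : List Int) : Int × List Int :=
  if i < n then
    let last := pyAt ps (pyAt stops (-1))   -- positions[stops[-1]]
    if pyAt ps (i : Int) - last > d then (-1, [])
    else if i = n - 1 then ((stops.length : Int), stops)
    else if pyAt ps ((i : Int) + 1) - last > d then planA_loop ps d n (i + 1) (stops ++ [(i : Int)])
    else planA_loop ps d n (i + 1) stops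
  else ((stops.length : Int), stops)
termination_by n - i

def plan_water_stops (positions : List Int) (duration : Int) : Int × List Int :=
  if positions = [] then (0, [])
  else planA_loop positions duration positions.length 1 [0]

-- ===== PORT B =====
-- inner while-loop: advance j while the next position is still reachable from position s
def planB_inner (ps : List Int) (d : Int) (n s j : Nat) : Nat :=
  if j + 1 < n ∧ pyAt ps ((j : Int) + 1) - pyAt ps (s : Int) ≤ d then planB_inner ps d n s (j + 1) else j
termination_by n - j

-- bounds on the inner scan, needed by planB_loop's termination proof
lemma planB_inner_ge (ps : List Int) (d : Int) (n s j : Nat) : j ≤ planB_inner ps d n s j := by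
  fun_induction planB_inner with
  | case1 j hcond ih => omega
  | case2 => exact le_refl _

lemma planB_inner_lt (ps : List Int) (d : Int) (n s j : Nat) : j < n → planB_inner ps d n s j < n := by
  fun_induction planB_inner with
  | case1 j hcond ih => intro _; exact ih (by omega)
  | case2 j hcond => intro h; exact h

-- outer while-loop: while the endpoint is not reachable from stop s, pick the farthest reachable j
def planB_loop (ps : List Int) (d : Int) (n : Nat) (s : Nat) (hs : s < n) (stops : List Int) : Int × List Int :=
  if pyAt ps ((n : Int) - 1) - pyAt ps (s : Int) > d then
    let j := planB_inner ps d n s s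
    if hj : j = s then (-1, [])
    else planB_loop ps d n j (planB_inner_lt ps d n s s hs) (stops ++ [(j : Int)])
  else ((stops.length : Int), stops)
termination_by n - s
decreasing_by
  exact Nat.sub_lt_sub_left hs (Nat.lt_of_le_of_ne (planB_inner_ge ps d n s s) (Ne.symm hj))

def plan_water_stops_alt (positions : List Int) (duration : Int) : Int × List Int :=
  if h : positions = [] then (0, [])
  else planB_loop positions duration positions.length 0 (List.length_pos_iff.mpr h) [0]

-- ===== PRECONDITION & SPEC =====
-- Pre_ excludes exactly the inputs on which A's asserts raise AssertionError:
-- a nonempty positions list that is not strictly increasing, or duration ≤ 0.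
def Pre_plan_water_stops (positions : List Int) (duration : Int) : Prop :=
  positions = [] ∨ (List.IsChain (· < ·) positions ∧ 0 < duration)
instance (positions : List Int) (duration : Int) : Decidable (Pre_plan_water_stops positions duration) := by
  unfold Pre_plan_water_stops; infer_instance

def pvWitness_plan_water_stops : List Int × Int := ([0, 5, 10, 18], 9)

def Spec_plan_water_stops (positions : List Int) (duration : Int) (out : Int × List Int) : Prop := out = plan_water_stops_alt positions duration
instance (positions : List Int) (duration : Int) (out : Int × List Int) : Decidable (Spec_plan_water_stops positions duration out) := by unfold Spec_plan_water_stops; infer_instance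

-- ===== CLAIM (what is proved, stated in full; the proofs are below) =====
def Claim_equal_plan_water_stops : Prop := ∀ (positions : List Int) (duration : Int), Dom_plan_water_stops positions duration → Pre_plan_water_stops positions duration → Spec_plan_water_stops positions duration (plan_water_stops positions duration)

-- ===== LEMMAS AND PROOFS =====

lemma pyAt_nat (ps : List Int) (k : Nat) (h : k < ps.length) : pyAt ps (k : Int) = ps[k] := by
  simp [pyAt, PySem.List.pyGet?_natCast, List.getElem?_eq_getElem h]

lemma pyAt_mono (ps : List Int) (hs : List.Pairwise (· < ·) ps) (i k : Nat)
    (hik : i ≤ k) (hk : k < ps.length) : pyAt ps (i : Int) ≤ pyAt ps (k : Int) := by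
  rw [pyAt_nat ps i (lt_of_le_of_lt hik hk), pyAt_nat ps k hk]
  rcases Nat.lt_or_ge i k with h | h
  · exact le_of_lt ((List.pairwise_iff_getElem.mp hs) i k _ _ h)
  · have : i = k := le_antisymm hik h
    subst this; exact le_refl _

-- the inner scan only visits reachable positions
lemma planB_inner_all (ps : List Int) (d : Int) (n s j : Nat) :
    ∀ k, j < k → k ≤ planB_inner ps d n s j → pyAt ps (k : Int) - pyAt ps (s : Int) ≤ d := by
  fun_induction planB_inner with
  | case1 j hcond ih =>
      intro k hk1 hk2
      rcases Nat.lt_or_ge (j + 1) k with h | h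
      · exact ih k h hk2
      · have : k = j + 1 := by omega
        subst this; exact_mod_cast hcond.2
  | case2 j hcond => intro k hk1 hk2; omega

-- the inner scan stops for a reason
lemma planB_inner_stop (ps : List Int) (d : Int) (n s j : Nat) :
    ¬(planB_inner ps d n s j + 1 < n ∧
      pyAt ps ((planB_inner ps d n s j : Int) + 1) - pyAt ps (s : Int) ≤ d) := by
  fun_induction planB_inner with
  | case1 j hcond ih => exact ih
  | case2 j hcond => exact hcond

-- If the endpoint is reachable from stop s, A's loop finishes with no further stop.
lemma A_reach (ps : List Int) (d : Int) (n : Nat) (hn : n = ps.length)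
    (hsorted : List.Pairwise (· < ·) ps) (s : Nat) (hs : s < n)
    (hreach : pyAt ps ((n : Int) - 1) - pyAt ps (s : Int) ≤ d) :
    ∀ i, s < i → ∀ stops, pyAt stops (-1) = (s : Int) →
      planA_loop ps d n i stops = ((stops.length : Int), stops) := by
  have hcast : ((n : Int) - 1) = (((n - 1 : Nat) : Int)) := by omega
  suffices H : ∀ m i, n - i ≤ m → s < i → ∀ stops, pyAt stops (-1) = (s : Int) →
      planA_loop ps d n i stops = ((stops.length : Int), stops) by
    exact fun i hi stops h => H n i (by omega) hi stops h
  intro m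
  induction m with
  | zero =>
      intro i hni hsi stops hlast
      rw [planA_loop]
      simp [Nat.not_lt.mpr (by omega : n ≤ i)]
  | succ m ih =>
      intro i hni hsi stops hlast
      by_cases hin : i < n
      · have h1 : ¬ (pyAt ps (i : Int) - pyAt ps (pyAt stops (-1)) > d) := by
          rw [hlast]
          have := pyAt_mono ps hsorted i (n - 1) (by omega) (by omega)
          rw [← hcast] at this
          omega
        by_cases hend : i = n - 1
        · rw [planA_loop]; simp only [if_pos hin, if_neg h1, if_pos hend]
        · have h2 : ¬ (pyAt ps ((i : Int) + 1) - pyAt ps (pyAt stops (-1)) > d) := by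
            rw [hlast]
            have hcast2 : ((i : Int) + 1) = (((i + 1 : Nat) : Int)) := by omega
            rw [hcast2]
            have := pyAt_mono ps hsorted (i + 1) (n - 1) (by omega) (by omega)
            rw [← hcast] at this
            omega
          rw [planA_loop]
          simp only [if_pos hin, if_neg h1, if_neg hend, if_neg h2]
          exact ih (i + 1) (by omega) (by omega) stops hlast
      · rw [planA_loop]; simp [hin]

-- A's loop walks from i to the appended stop j without changing state.
lemma A_walk (ps : List Int) (d : Int) (n : Nat) (s j : Nat) (hsj : s < j) (hjn : j < n - 1)
    (hall : ∀ k, s < k → k ≤ j → pyAt ps (k : Int) - pyAt ps (s : Int) ≤ d)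
    (hjump : pyAt ps ((j : Int) + 1) - pyAt ps (s : Int) > d)
    (stops : List Int) (hlast : pyAt stops (-1) = (s : Int)) :
    ∀ i, s < i → i ≤ j →
      planA_loop ps d n i stops = planA_loop ps d n (j + 1) (stops ++ [(j : Int)]) := by
  suffices H : ∀ m i, j - i ≤ m → s < i → i ≤ j →
      planA_loop ps d n i stops = planA_loop ps d n (j + 1) (stops ++ [(j : Int)]) by
    exact fun i h1 h2 => H j i (by omega) h1 h2
  intro m
  induction m with
  | zero =>
      intro i hm h1 h2
      have hij : i = j := by omega
      subst hij
      rw [planA_loop]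
      have hin : i < n := by omega
      have hc1 : ¬ (pyAt ps (i : Int) - pyAt ps (pyAt stops (-1)) > d) := by
        rw [hlast]; have := hall i h1 h2; omega
      have hend : ¬ (i = n - 1) := by omega
      have hc3 : pyAt ps ((i : Int) + 1) - pyAt ps (pyAt stops (-1)) > d := by
        rw [hlast]; exact hjump
      simp only [if_pos hin, if_neg hc1, if_neg hend, if_pos hc3]
  | succ m ih =>
      intro i hm h1 h2
      by_cases hij : i = j
      · subst hij
        rw [planA_loop]
        have hin : i < n := by omega
        have hc1 : ¬ (pyAt ps (i : Int) - pyAt ps (pyAt stops (-1)) > d) := by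
          rw [hlast]; have := hall i h1 h2; omega
        have hend : ¬ (i = n - 1) := by omega
        have hc3 : pyAt ps ((i : Int) + 1) - pyAt ps (pyAt stops (-1)) > d := by
          rw [hlast]; exact hjump
        simp only [if_pos hin, if_neg hc1, if_neg hend, if_pos hc3]
      · have hin : i < n := by omega
        have hc1 : ¬ (pyAt ps (i : Int) - pyAt ps (pyAt stops (-1)) > d) := by
          rw [hlast]; have := hall i h1 h2; omega
        have hend : ¬ (i = n - 1) := by omega
        have hc3 : ¬ (pyAt ps ((i : Int) + 1) - pyAt ps (pyAt stops (-1)) > d) := by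
          rw [hlast]
          have hcast : ((i : Int) + 1) = (((i + 1 : Nat) : Int)) := by omega
          rw [hcast]
          have := hall (i + 1) (by omega) (by omega)
          omega
        rw [planA_loop]
        simp only [if_pos hin, if_neg hc1, if_neg hend, if_neg hc3]
        exact ih (i + 1) (by omega) (by omega) (by omega)

lemma main_loop (ps : List Int) (d : Int) (n : Nat) (hn : n = ps.length)
    (hsorted : List.Pairwise (· < ·) ps) (hd : 0 < d) :
    ∀ s (hs : s < n) stops, pyAt stops (-1) = (s : Int) →
      planA_loop ps d n (s + 1) stops = planB_loop ps d n s hs stops := by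
  suffices H : ∀ m s (hs : s < n), n - s ≤ m → ∀ stops, pyAt stops (-1) = (s : Int) →
      planA_loop ps d n (s + 1) stops = planB_loop ps d n s hs stops by
    exact fun s hs stops h => H n s hs (by omega) stops h
  intro m
  induction m with
  | zero => intro s hs hm; omega
  | succ m ih =>
      intro s hs hm stops hlast
      rw [planB_loop]
      by_cases hgt : pyAt ps ((n : Int) - 1) - pyAt ps (s : Int) > d
      · have hsn1 : s < n - 1 := by
          rcases Nat.lt_or_ge s (n - 1) with h | h
          · exact h
          · exfalso
            have hse : s = n - 1 := by omega
            have : ((n : Int) - 1) = ((s : Nat) : Int) := by omega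
            rw [this] at hgt
            omega
        by_cases hj : planB_inner ps d n s s = s
        · -- inner scan cannot advance: both return (-1, [])
          have hstop := planB_inner_stop ps d n s s
          rw [hj] at hstop
          have hc1 : pyAt ps (((s + 1 : Nat) : Int)) - pyAt ps (s : Int) > d := by
            have hcast : (((s + 1 : Nat) : Int)) = ((s : Int) + 1) := by omega
            rw [hcast]
            by_contra hc
            exact hstop ⟨by omega, by omega⟩
          rw [planA_loop]
          have hin : s + 1 < n := by omega
          simp only [if_pos hin, if_pos hgt, hlast, if_pos hc1, dif_pos hj]
        · -- inner scan advances to j: A walks to j, appends it, and both recurse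
          set j := planB_inner ps d n s s with hjdef
          have hjge : s ≤ j := planB_inner_ge ps d n s s
          have hjgt : s < j := by omega
          have hjlt : j < n := planB_inner_lt ps d n s s hs
          have hall : ∀ k, s < k → k ≤ j → pyAt ps (k : Int) - pyAt ps (s : Int) ≤ d :=
            planB_inner_all ps d n s s
          have hjn1 : j < n - 1 := by
            rcases Nat.lt_or_ge j (n - 1) with h | h
            · exact h
            · exfalso
              have hje : j = n - 1 := by omega
              have h1 := hall j hjgt (le_refl j)
              have : ((n : Int) - 1) = ((j : Nat) : Int) := by omega
              rw [this] at hgt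
              omega
          have hjump : pyAt ps ((j : Int) + 1) - pyAt ps (s : Int) > d := by
            have hstop := planB_inner_stop ps d n s s
            rw [← hjdef] at hstop
            by_contra hc
            exact hstop ⟨by omega, by omega⟩
          have hlast' : pyAt (stops ++ [(j : Int)]) (-1) = (j : Int) := by
            simp [pyAt, PySem.List.pyGet?_neg_one]
          calc planA_loop ps d n (s + 1) stops
              = planA_loop ps d n (j + 1) (stops ++ [(j : Int)]) :=
                A_walk ps d n s j hjgt hjn1 hall hjump stops hlast (s + 1) (by omega) (by omega)
            _ = planB_loop ps d n j (planB_inner_lt ps d n s s hs) (stops ++ [(j : Int)]) :=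
                ih j hjlt (by omega) (stops ++ [(j : Int)]) hlast'
          rw [if_pos hgt, dif_neg hj]
      · rw [if_neg hgt]
        exact A_reach ps d n hn hsorted s hs (by omega) (s + 1) (by omega) stops hlast

-- ===== VERDICT (by name: the statement is the Claim_ definition above) =====
theorem plan_water_stops_spec : Claim_equal_plan_water_stops := by
  intro positions duration _hdom hpre
  unfold Spec_plan_water_stops plan_water_stops plan_water_stops_alt
  by_cases hemp : positions = []
  · simp [hemp]
  · simp only [if_neg hemp, dif_neg hemp]
    rcases hpre with h | ⟨hchain, hd⟩
    · exact absurd h hemp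
    · have hsorted := List.isChain_iff_pairwise.mp hchain
      have h0 : 0 < positions.length := List.length_pos_iff.mpr hemp
      exact main_loop positions duration positions.length rfl hsorted hd 0 h0 [0] (by decide)
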